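-- pv_equiv track=rewrite | github.com/rajesh95cs/cracking-the-coding-interview | Arrays and Strings/text file comparison/text_file_comparison.py | file_comparisons
-- ===== SOURCE A (Python) =====
-- def file_comparisons(file_words1,file_words2):
-- #an empty dictionary f1_dict which is created for file 1
--     f1_dict = {}
-- #relword_count dictionary is declared to store the words which occur in both
-- #the files as keys and relative count as values.the relative count is found by
-- #taking the difference of counts which are stored in the dictionary
--     relword_count = {}
-- #loop through the file_words1 list to see whether the word exist in the
-- #dictionary if the condition is satisfied the the value of occurence of the
-- #word is incremented else it is set to 1 .this is how the dictionary is made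
--     for word in file_words1:
--         if word in f1_dict:
--             f1_dict[word] += 1
--         else:
--             f1_dict[word] = 1
-- #loop through the file_words2 list which contains the list of words of the file
-- #2 here the dictionary for file2 is not made because it is not necessary and to
-- #increase the efficiency of the algorithm
--     for word in file_words2:
-- #here word in file 2 is compared with keys of relword_count dictionary
-- #if the word exist in the keys just decrease the value to the corresponding key
-- #by 1 else if it exist in file 2 word dictionary decrement the value and store
-- #the key value in relword_count dictionary
--         if word in relword_count:
--             relword_count[word] -= 1
--         elif word in f1_dict:
--             relword_count[word] = f1_dict[word] - 1
-- #the sum of the relword_count dictionary values gives the factor which tell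
-- #whether text files are almost same
--     sum = 0
--     for value in relword_count.values():
--         sum += abs(value)
--
--     return sum
-- ===== SOURCE B (Python) =====
-- def file_comparisons(file_words1, file_words2):
--     # full counts of both word lists
--     c1 = {}
--     for w in file_words1:
--         c1[w] = c1.get(w, 0) + 1
--     c2 = {}
--     for w in file_words2:
--         c2[w] = c2.get(w, 0) + 1
--     # only words common to both files contribute
--     return sum(abs(c1[w] - c2[w]) for w in c1.keys() & c2.keys())
-- ===== Notes on version B (the rewrite author's own statement) =====
-- stated objective: simpler
-- what changed: Replaces A's asymmetric second loop (a decrement-or-insert dict built incrementally over file 2 against a hand-rolled counter for file 1) by two symmetric full counters and a single sum of abs(c1[w]-c2[w]) over the intersection of their key sets.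
import Mathlib
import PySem

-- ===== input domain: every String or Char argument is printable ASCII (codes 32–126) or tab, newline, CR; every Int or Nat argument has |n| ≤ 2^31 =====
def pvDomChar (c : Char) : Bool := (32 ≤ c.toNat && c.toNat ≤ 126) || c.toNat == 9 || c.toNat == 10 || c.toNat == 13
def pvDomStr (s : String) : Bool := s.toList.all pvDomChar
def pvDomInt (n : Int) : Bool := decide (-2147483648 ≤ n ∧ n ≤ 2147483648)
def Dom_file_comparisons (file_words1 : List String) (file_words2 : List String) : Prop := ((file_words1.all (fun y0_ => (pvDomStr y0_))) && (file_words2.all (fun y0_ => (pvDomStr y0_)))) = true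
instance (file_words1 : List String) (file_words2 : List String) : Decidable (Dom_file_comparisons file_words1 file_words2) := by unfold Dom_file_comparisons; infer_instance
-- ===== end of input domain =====

-- B replaces A's two incremental dict-building loops by an explicit set intersection plus
-- per-word count calls (objective: simpler); both programs are total and return the same value.

-- ===== PORT A =====
def file_comparisons (file_words1 : List String) (file_words2 : List String) : Int :=
  let f1_dict : PySem.Dict String Int :=
    file_words1.foldl (fun d word =>
      if d.contains word then d.modify word 0 (· + 1) else d.insert word 1)
      PySem.Dict.empty
  let relword_count : PySem.Dict String Int :=
    file_words2.foldl (fun r word =>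
      if r.contains word then r.modify word 0 (· - 1)
      else if f1_dict.contains word then r.insert word (f1_dict.getD word 0 - 1)
      else r)
      PySem.Dict.empty
  relword_count.values.foldl (fun s v => s + |v|) 0

-- ===== PORT B =====
def file_comparisons_alt (file_words1 : List String) (file_words2 : List String) : Int :=
  let c1 : PySem.Dict String Int :=
    file_words1.foldl (fun d w => d.insert w (d.getD w 0 + 1)) PySem.Dict.empty
  let c2 : PySem.Dict String Int :=
    file_words2.foldl (fun d w => d.insert w (d.getD w 0 + 1)) PySem.Dict.empty
  ((PySem.Set.inter c1.keys c2.keys).map (fun w => |(c1.getD w 0 - c2.getD w 0)|)).sum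

-- ===== PRECONDITION & SPEC =====
def Spec_file_comparisons (file_words1 : List String) (file_words2 : List String) (out : Int) : Prop := out = file_comparisons_alt file_words1 file_words2
instance (file_words1 : List String) (file_words2 : List String) (out : Int) : Decidable (Spec_file_comparisons file_words1 file_words2 out) := by unfold Spec_file_comparisons; infer_instance

-- ===== CLAIM (what is proved, stated in full; the proofs are below) =====
def Claim_equal_file_comparisons : Prop := ∀ (file_words1 : List String) (file_words2 : List String), Dom_file_comparisons file_words1 file_words2 → Spec_file_comparisons file_words1 file_words2 (file_comparisons file_words1 file_words2)

-- ===== LEMMAS AND PROOFS =====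

lemma count_append_singleton_ne (l : List String) (w w' : String) (h : w' ≠ w) :
    (l ++ [w]).count w' = l.count w' := by
  simp [List.count_append, Ne.symm h]

lemma count_append_singleton_self (l : List String) (w : String) :
    (l ++ [w]).count w = l.count w + 1 := by
  simp [List.count_append]

-- A's first loop builds exactly Counter(file_words1).
lemma f1_eq_counter (xs : List String) :
    xs.foldl (fun d word =>
      if d.contains word then d.modify word 0 (· + 1) else d.insert word 1)
      PySem.Dict.empty = PySem.Dict.counter xs := by
  have hstep : (fun (d : PySem.Dict String Int) word =>
      if d.contains word then d.modify word 0 (· + 1) else d.insert word 1)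
      = (fun d word => d.modify word 0 (· + 1)) := by
    funext d word
    by_cases h : d.contains word = true
    · simp [h]
    · simp only [Bool.not_eq_true] at h
      simp only [h, if_neg Bool.false_ne_true]
      show d.insert word 1 = d.insert word (d.getD word 0 + 1)
      simp [PySem.Dict.getD_of_not_contains, h]
  rw [hstep, PySem.Dict.counter_eq_foldl]

-- Invariant of A's second loop: its keys are the distinct words of the second list that
-- occur in f1, in first-occurrence order, and each key's value is f1[w] minus its count so far.
lemma rel_spec (f1 : PySem.Dict String Int) (l : List String) :
    (l.foldl (fun r word =>
      if r.contains word then r.modify word 0 (· - 1)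
      else if f1.contains word then r.insert word (f1.getD word 0 - 1)
      else r) PySem.Dict.empty).keys
        = PySem.Set.ofList (l.filter (fun w => f1.contains w)) ∧
    ∀ w ∈ (l.foldl (fun r word =>
      if r.contains word then r.modify word 0 (· - 1)
      else if f1.contains word then r.insert word (f1.getD word 0 - 1)
      else r) PySem.Dict.empty).keys,
      (l.foldl (fun r word =>
        if r.contains word then r.modify word 0 (· - 1)
        else if f1.contains word then r.insert word (f1.getD word 0 - 1)
        else r) PySem.Dict.empty).getD w 0 = f1.getD w 0 - (l.count w : Int) := by
  induction l using List.reverseRecOn with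
  | nil => simp [PySem.Set.ofList]
  | append_singleton l w ih =>
    obtain ⟨hk, hv⟩ := ih
    simp only [List.foldl_append, List.foldl_cons, List.foldl_nil] at *
    set R := l.foldl (fun r word =>
      if r.contains word then r.modify word 0 (· - 1)
      else if f1.contains word then r.insert word (f1.getD word 0 - 1)
      else r) PySem.Dict.empty with hR
    by_cases hc : R.contains w = true
    · -- word already a key of relword_count: decrement its value
      have hwk : w ∈ R.keys := (PySem.Dict.contains_iff_mem_keys R w).mp hc
      have hwf : w ∈ l.filter (fun w => f1.contains w) := by
        rw [hk] at hwk; exact (PySem.Set.mem_ofList _ _).mp hwk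
      have hpw : f1.contains w = true := (List.mem_filter.mp hwf).2
      simp only [hc, if_true]
      refine ⟨?_, ?_⟩
      · rw [PySem.Dict.keys_modify, PySem.Dict.keys_insert_of_contains R _ hc, hk,
          List.filter_append, List.filter_cons, hpw, if_pos rfl, List.filter_nil,
          PySem.Set.ofList_append_singleton, PySem.Set.add_of_mem]
        rw [hk] at hwk; exact hwk
      · intro w' hw'
        rw [PySem.Dict.keys_modify, PySem.Dict.keys_insert_of_contains R _ hc] at hw'
        rw [PySem.Dict.getD_modify]
        by_cases he : w' = w
        · subst he
          rw [if_pos rfl, hv w' hw', count_append_singleton_self]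
          push_cast; ring
        · rw [if_neg he, hv w' hw', count_append_singleton_ne l w w' he]
    · have hc' : R.contains w = false := by simpa using hc
      have hwk : w ∉ R.keys := fun h => hc ((PySem.Dict.contains_iff_mem_keys R w).mpr h)
      by_cases hf : f1.contains w = true
      · -- new common word: insert f1[w] - 1
        have hwl : w ∉ l := fun hmem =>
          hwk (hk ▸ (PySem.Set.mem_ofList _ _).mpr (List.mem_filter.mpr ⟨hmem, hf⟩))
        simp only [hc', if_neg Bool.false_ne_true, hf, if_true]
        refine ⟨?_, ?_⟩
        · rw [PySem.Dict.keys_insert_of_not_contains R _ hc', hk, List.filter_append,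
            List.filter_cons, hf, if_pos rfl, List.filter_nil,
            PySem.Set.ofList_append_singleton, PySem.Set.add_of_not_mem]
          intro h
          exact hwl (List.mem_filter.mp ((PySem.Set.mem_ofList _ _).mp h)).1
        · intro w' hw'
          rw [PySem.Dict.getD_insert]
          by_cases he : w' = w
          · subst he
            rw [if_pos rfl, count_append_singleton_self, List.count_eq_zero.mpr hwl]
            simp
          · rw [if_neg he]
            rw [PySem.Dict.keys_insert_of_not_contains R _ hc'] at hw'
            have hw'' : w' ∈ R.keys := by
              rcases List.mem_append.mp hw' with h | h
              · exact h
              · exact absurd (List.mem_singleton.mp h) he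
            rw [hv w' hw'', count_append_singleton_ne l w w' he]
      · -- word not in file 1: relword_count unchanged
        have hf' : f1.contains w = false := by simpa using hf
        simp only [hc', hf', if_neg Bool.false_ne_true]
        refine ⟨?_, ?_⟩
        · rw [hk, List.filter_append, List.filter_cons, hf']
          simp
        · intro w' hw'
          have hne : w' ≠ w := by
            intro he; subst he; exact hwk hw'
          rw [hv w' hw', count_append_singleton_ne l w w' hne]

lemma file_comparisons_eq_alt (fw1 fw2 : List String) :
    file_comparisons fw1 fw2 = file_comparisons_alt fw1 fw2 := by
  unfold file_comparisons file_comparisons_alt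
  simp only [f1_eq_counter, PySem.Dict.foldl_insert_getD_add_one_eq_counter,
    PySem.Dict.keys_counter]
  obtain ⟨hk, hv⟩ := rel_spec (PySem.Dict.counter fw1) fw2
  set R := fw2.foldl (fun r word =>
      if r.contains word then r.modify word 0 (· - 1)
      else if (PySem.Dict.counter fw1).contains word then
        r.insert word ((PySem.Dict.counter fw1).getD word 0 - 1)
      else r) PySem.Dict.empty with hR
  have hnd : R.keys.Nodup := hk ▸ PySem.Set.nodup_ofList _
  rw [PySem.Dict.values_eq_map_keys R hnd 0,
    PySem.List.foldl_add (g := fun v => |v|), zero_add, List.map_map]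
  have hmap : R.keys.map ((fun v => |v|) ∘ fun k => R.getD k 0)
      = R.keys.map (fun w =>
          |((PySem.Dict.counter fw1).getD w 0 - (PySem.Dict.counter fw2).getD w 0)|) := by
    apply List.map_congr_left
    intro w hw
    simp only [Function.comp]
    rw [hv w hw, PySem.Dict.getD_counter fw2 w]
  rw [hmap]
  have hperm : R.keys.Perm
      (PySem.Set.inter (PySem.Set.ofList fw1) (PySem.Set.ofList fw2)) := by
    rw [List.perm_ext_iff_of_nodup hnd
      (PySem.Set.nodup_inter _ _ (PySem.Set.nodup_ofList fw1))]
    intro w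
    rw [hk, PySem.Set.mem_ofList, List.mem_filter, PySem.Set.mem_inter,
      PySem.Set.mem_ofList, PySem.Set.mem_ofList, PySem.Dict.contains_counter]
    constructor
    · rintro ⟨h2, h1⟩; exact ⟨by simpa using h1, h2⟩
    · rintro ⟨h1, h2⟩; exact ⟨h2, by simpa using h1⟩
  exact (hperm.map _).sum_eq

-- ===== VERDICT (by name: the statement is the Claim_ definition above) =====
theorem file_comparisons_spec : Claim_equal_file_comparisons := by
  intro file_words1 file_words2 _
  exact file_comparisons_eq_alt file_words1 file_words2
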